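-- pv_equiv track=rewrite | github.com/YulenkaW/Assignment-AI-agent | src/assignment_agent/repository_index.py | _symbols_for_content
-- ===== SOURCE A (Python) =====
-- def _symbols_for_content(symbols: list[str], content: str) -> list[str]:
--     """Return the symbols that appear inside the chunk."""
--     matching_symbols = []
--     for symbol_name in symbols:
--         if symbol_name in content:
--             matching_symbols.append(symbol_name)
--         if len(matching_symbols) >= 12:
--             break
--     return matching_symbols
-- ===== SOURCE B (Python) =====
-- def _symbols_for_content(symbols: list[str], content: str) -> list[str]:
--     """Return the symbols that appear inside the chunk (content-substring index)."""
--     lengths = {len(s) for s in symbols}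
--     subs = set()
--     for L in lengths:
--         for i in range(len(content) - L + 1):
--             subs.add(content[i:i + L])
--     out = []
--     for s in symbols:
--         if s in subs:
--             out.append(s)
--             if len(out) == 12:
--                 break
--     return out
-- ===== Notes on version B (the rewrite author's own statement) =====
-- stated objective: alternative
-- what changed: Instead of running a substring search of content for every symbol, B builds one set of all substrings of content whose lengths occur among the symbols and then makes a single in-order membership pass over symbols (stopping at 12), so the per-symbol scan of content disappears.
import Mathlib
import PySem

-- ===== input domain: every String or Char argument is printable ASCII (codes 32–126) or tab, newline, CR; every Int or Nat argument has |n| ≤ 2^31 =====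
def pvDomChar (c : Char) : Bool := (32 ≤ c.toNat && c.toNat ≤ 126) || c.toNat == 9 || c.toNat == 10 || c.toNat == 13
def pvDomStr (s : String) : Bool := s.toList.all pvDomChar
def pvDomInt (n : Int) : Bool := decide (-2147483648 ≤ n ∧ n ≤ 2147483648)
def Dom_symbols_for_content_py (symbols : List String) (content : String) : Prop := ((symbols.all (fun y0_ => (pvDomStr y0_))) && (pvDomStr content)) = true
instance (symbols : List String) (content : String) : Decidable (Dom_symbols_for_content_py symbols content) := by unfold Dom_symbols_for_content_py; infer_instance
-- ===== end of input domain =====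

-- B replaces the per-symbol substring searches by one index of content's substrings
-- (a set of all content slices of the lengths occurring among the symbols), then a
-- single in-order pass over symbols; an alternative algorithm, not claimed faster.

-- ===== PORT A =====
-- loop 'for symbol_name in symbols: … break' of A, acc = matching_symbols
def symbolsLoopA (content : String) : List String → List String → List String
  | [], acc => acc
  | s :: rest, acc =>
    let acc' := if PySem.Str.isIn s content then acc ++ [s] else acc
    if 12 ≤ acc'.length then acc' else symbolsLoopA content rest acc'

def symbols_for_content_py (symbols : List String) (content : String) : List String :=
  symbolsLoopA content symbols []

-- ===== PORT B =====
-- 'lengths = {len(s) for s in symbols}; subs = set(); for L in lengths: for i in range(len(content)-L+1): subs.add(content[i:i+L])'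
def pvSubsSet (symbols : List String) (content : String) : PySem.Set String :=
  let lengths : PySem.Set Int := PySem.Set.ofList (symbols.map PySem.Str.len)
  lengths.foldl (fun subs L =>
    (PySem.List.pyRange 0 (PySem.Str.len content - L + 1) 1).foldl
      (fun subs i => subs.add (PySem.Str.slice content (some i) (some (i + L)))) subs)
    PySem.Set.empty

-- 'out = []; for s in symbols: if s in subs: out.append(s); if len(out) == 12: break'
def symbolsLoopB (found : PySem.Set String) : List String → List String → List String
  | [], out => out
  | s :: rest, out =>
    if found.contains s then
      let out' := out ++ [s]
      if out'.length = 12 then out' else symbolsLoopB found rest out'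
    else symbolsLoopB found rest out

def symbols_for_content_py_alt (symbols : List String) (content : String) : List String :=
  symbolsLoopB (pvSubsSet symbols content) symbols []

-- ===== PRECONDITION & SPEC =====
def Spec_symbols_for_content_py (symbols : List String) (content : String) (out : List String) : Prop := out = symbols_for_content_py_alt symbols content
instance (symbols : List String) (content : String) (out : List String) : Decidable (Spec_symbols_for_content_py symbols content out) := by unfold Spec_symbols_for_content_py; infer_instance

-- ===== CLAIM (what is proved, stated in full; the proofs are below) =====
def Claim_equal_symbols_for_content_py : Prop := ∀ (symbols : List String) (content : String), Dom_symbols_for_content_py symbols content → Spec_symbols_for_content_py symbols content (symbols_for_content_py symbols content)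

-- ===== LEMMAS AND PROOFS =====

-- membership in the nested substring-collecting loop
theorem mem_pvSubsFold (content : String) (ls : List Int) (init : PySem.Set String) (y : String) :
    y ∈ ls.foldl (fun subs L =>
        (PySem.List.pyRange 0 (PySem.Str.len content - L + 1) 1).foldl
          (fun subs i => subs.add (PySem.Str.slice content (some i) (some (i + L)))) subs) init
      ↔ y ∈ init ∨ ∃ L ∈ ls, ∃ i ∈ PySem.List.pyRange 0 (PySem.Str.len content - L + 1) 1,
          y = PySem.Str.slice content (some i) (some (i + L)) := by
  induction ls generalizing init with
  | nil => simp
  | cons L rest ih =>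
    simp only [List.foldl_cons, ih, PySem.Set.mem_foldl_add, List.mem_cons]
    constructor
    · rintro ((h | ⟨i, hi, rfl⟩) | ⟨M, hM, i, hi, rfl⟩)
      · exact Or.inl h
      · exact Or.inr ⟨L, Or.inl rfl, i, hi, rfl⟩
      · exact Or.inr ⟨M, Or.inr hM, i, hi, rfl⟩
    · rintro (h | ⟨M, (rfl | hM), i, hi, rfl⟩)
      · exact Or.inl (Or.inl h)
      · exact Or.inl (Or.inr ⟨i, hi, rfl⟩)
      · exact Or.inr ⟨M, hM, i, hi, rfl⟩

theorem mem_pvSubsSet (symbols : List String) (content : String) (y : String) :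
    y ∈ pvSubsSet symbols content
      ↔ ∃ L ∈ symbols.map PySem.Str.len, ∃ i ∈ PySem.List.pyRange 0 (PySem.Str.len content - L + 1) 1,
          y = PySem.Str.slice content (some i) (some (i + L)) := by
  unfold pvSubsSet
  rw [mem_pvSubsFold]
  simp [PySem.Set.mem_ofList, PySem.Set.empty]

theorem pvToListSliceNat (content : String) (j n : Nat) :
    (PySem.Str.slice content (some (j : Int)) (some ((j : Int) + (n : Int)))).toList
      = (content.toList.drop j).take n := by
  rw [PySem.Str.toList_slice, PySem.Chars.slice_eq_listSlice, PySem.List.slice_natCast_add]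

theorem contains_pvSubsSet (symbols : List String) (content : String) (s : String)
    (hs : s ∈ symbols) :
    PySem.Set.contains (pvSubsSet symbols content) s = PySem.Str.isIn s content := by
  rw [Bool.eq_iff_iff, PySem.Set.contains_iff, mem_pvSubsSet, PySem.Str.isIn_eq,
    ← PySem.Chars.exists_prefix_drop_iff_isIn]
  constructor
  · rintro ⟨L, hL, i, hi, rfl⟩
    rw [List.mem_map] at hL
    obtain ⟨t, -, rfl⟩ := hL
    rw [PySem.List.mem_pyRange_one] at hi
    refine ⟨i.toNat, ?_⟩
    have hi0 : i = (i.toNat : Int) := (Int.toNat_of_nonneg hi.1).symm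
    rw [hi0, PySem.Str.len_eq, pvToListSliceNat]
    exact List.take_prefix _ _
  · rintro ⟨j, hj⟩
    refine ⟨PySem.Str.len s, List.mem_map_of_mem hs, ?_⟩
    have hlen : s.toList.length ≤ content.toList.length - j := by
      simpa using hj.length_le
    by_cases hm : s.toList.length = 0
    · refine ⟨0, ?_, ?_⟩
      · rw [PySem.List.mem_pyRange_one, PySem.Str.len_eq, PySem.Str.len_eq, hm]
        constructor
        · exact le_refl 0
        · omega
      · apply String.toList_inj.mp
        have h0 : (0 : Int) = ((0 : Nat) : Int) := rfl
        rw [PySem.Str.len_eq, hm, h0, pvToListSliceNat]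
        simp [List.eq_nil_of_length_eq_zero hm]
    · have hjN : j + s.toList.length ≤ content.toList.length := by omega
      refine ⟨(j : Int), ?_, ?_⟩
      · rw [PySem.List.mem_pyRange_one, PySem.Str.len_eq, PySem.Str.len_eq]
        constructor
        · exact Int.natCast_nonneg j
        · omega
      · apply String.toList_inj.mp
        rw [PySem.Str.len_eq, pvToListSliceNat]
        exact List.prefix_iff_eq_take.mp hj

theorem loopB_eq_loopA (content : String) (found : PySem.Set String) (syms : List String)
    (hmem : ∀ s ∈ syms, found.contains s = PySem.Str.isIn s content) :
    ∀ acc, acc.length < 12 → symbolsLoopB found syms acc = symbolsLoopA content syms acc := by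
  induction syms with
  | nil => intro acc _; rfl
  | cons s rest ih =>
    intro acc hacc
    have hs := hmem s (List.mem_cons_self ..)
    have hrest : ∀ t ∈ rest, found.contains t = PySem.Str.isIn t content :=
      fun t ht => hmem t (List.mem_cons_of_mem _ ht)
    simp only [symbolsLoopB, symbolsLoopA, hs]
    cases h : PySem.Str.isIn s content with
    | true =>
      have hlen : (acc ++ [s]).length = acc.length + 1 := by simp
      by_cases h12 : (acc ++ [s]).length = 12
      · simp [h12]
      · have h12' : ¬ 12 ≤ (acc ++ [s]).length := by omega
        simp only [if_true, if_neg h12, if_neg h12']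
        exact ih hrest (acc ++ [s]) (by omega)
    | false =>
      have : ¬ 12 ≤ acc.length := by omega
      simp only [Bool.false_eq_true, if_false, if_neg this]
      exact ih hrest acc hacc

-- ===== VERDICT (by name: the statement is the Claim_ definition above) =====
theorem symbols_for_content_py_spec : Claim_equal_symbols_for_content_py := by
  intro symbols content _
  unfold Spec_symbols_for_content_py symbols_for_content_py symbols_for_content_py_alt
  exact (loopB_eq_loopA content _ symbols
    (fun s hs => contains_pvSubsSet symbols content s hs) [] (by norm_num)).symm
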